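-- pv_equiv track=rewrite | github.com/wansik5991/Programmers_morespicy | MoreSpicy.py | solution
-- ===== SOURCE A (Python) =====
-- import heapq
--
-- def solution(scoville, K):
--     heapq.heapify(scoville)
--     cnt = 0
--
--     while True :
--         min_ = heapq.heappop(scoville)
--         if min_ >= K :
--             break
--         elif len(scoville) == 0 :
--             return -1
--         second_min = heapq.heappop(scoville)
--         heapq.heappush(scoville, min_ + (second_min * 2))
--         cnt += 1
--     return cnt
-- ===== SOURCE B (Python) =====
-- def solution(scoville, K):
--     # Sorted-list version: sort once, keep the list sorted with an ordered insert.
--     # Mutates scoville like A does (same final multiset, sorted rather than heap order).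
--     scoville.sort()
--     cnt = 0
--     while scoville[0] < K:
--         if len(scoville) < 2:
--             return -1
--         x = scoville[0] + 2 * scoville[1]
--         del scoville[:2]
--         i = 0
--         while i < len(scoville) and scoville[i] < x:
--             i += 1
--         scoville.insert(i, x)
--         cnt += 1
--     return cnt
-- ===== Notes on version B (the rewrite author's own statement) =====
-- stated objective: alternative
-- what changed: Replaces the binary heap (heapify/heappop/heappush, pop-then-break loop) by a list sorted once and kept sorted with an ordered linear insert, driven by a top-of-loop `while scoville[0] < K` with a length guard before popping.
import Mathlib
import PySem

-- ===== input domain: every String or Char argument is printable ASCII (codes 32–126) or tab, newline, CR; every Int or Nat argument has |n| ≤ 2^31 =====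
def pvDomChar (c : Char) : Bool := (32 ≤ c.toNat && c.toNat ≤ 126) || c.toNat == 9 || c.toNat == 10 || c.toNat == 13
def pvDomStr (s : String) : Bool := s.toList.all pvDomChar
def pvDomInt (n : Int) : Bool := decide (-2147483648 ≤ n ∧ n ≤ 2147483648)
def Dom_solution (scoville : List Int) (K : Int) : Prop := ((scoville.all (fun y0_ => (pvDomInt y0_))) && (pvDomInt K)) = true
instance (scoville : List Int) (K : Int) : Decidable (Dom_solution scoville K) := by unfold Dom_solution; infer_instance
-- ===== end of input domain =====

-- B replaces A's binary heap by a once-sorted list maintained with an ordered linear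
-- insert and a top-of-loop condition (alternative structure, same return values).
-- Both A and B mutate the argument list in place; the equivalence proved here is about
-- the RETURN value only (A leaves a heap-ordered list, B a sorted one — same multiset).

-- ===== PORT A =====
-- heapq has no PySem primitive; its calls are ported by their exact value semantics:
-- heappop returns the minimum element and removes one occurrence of it, heappush adds
-- its element, heapify only reorders.  This is exact for everything A's code observes
-- (the sequence of popped values and the length).
def heapPop? (l : List Int) : Option (Int × List Int) :=
  match PySem.List.min? l (fun x => x) with
  | none => none
  | some m => some (m, l.erase m)

def loopA (K : Int) : Nat → List Int → Int → Int
  | 0, _, cnt => cnt          -- unreachable: fuel = length and the loop stops at length ≥ 1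
  | fuel + 1, l, cnt =>
    match heapPop? l with
    | none => 0               -- IndexError in Python: only reachable from an empty start
    | some (m, rest) =>
      if m ≥ K then cnt
      else if rest.length = 0 then -1
      else
        match heapPop? rest with
        | none => 0           -- unreachable: rest.length ≠ 0 here
        | some (m2, rest2) => loopA K fuel (rest2 ++ [m + m2 * 2]) (cnt + 1)

def solution (scoville : List Int) (K : Int) : Int :=
  loopA K scoville.length scoville 0

-- ===== PORT B =====
-- linear scan to the first element ≥ x, insert there (Source B's while/insert)
def insLin (x : Int) : List Int → List Int
  | [] => [x]
  | h :: t => if h < x then h :: insLin x t else x :: h :: t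

def loopB (K : Int) : Nat → List Int → Int → Int
  | 0, _, cnt => cnt
  | fuel + 1, l, cnt =>
    match l with
    | [] => 0                 -- scoville[0]: IndexError, only reachable from an empty start
    | h :: t =>
      if h < K then
        match t with
        | [] => -1            -- len(scoville) < 2
        | h2 :: t2 => loopB K fuel (insLin (h + 2 * h2) t2) (cnt + 1)
      else cnt

def solution_alt (scoville : List Int) (K : Int) : Int :=
  let s := PySem.List.sorted scoville (fun x => x) false
  loopB K s.length s 0

-- ===== PRECONDITION & SPEC =====
-- Pre_ excludes only the empty list, on which Python A raises IndexError (heappop of []).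
def Pre_solution (scoville : List Int) (K : Int) : Prop := scoville ≠ []
instance (scoville : List Int) (K : Int) : Decidable (Pre_solution scoville K) := by
  unfold Pre_solution; infer_instance

def pvWitness_solution : List Int × Int := ([1, 2, 3, 9, 10, 12], 7)

def Spec_solution (scoville : List Int) (K : Int) (out : Int) : Prop := out = solution_alt scoville K
instance (scoville : List Int) (K : Int) (out : Int) : Decidable (Spec_solution scoville K out) := by unfold Spec_solution; infer_instance

-- ===== CLAIM (what is proved, stated in full; the proofs are below) =====
def Claim_equal_solution : Prop := ∀ (scoville : List Int) (K : Int), Dom_solution scoville K → Pre_solution scoville K → Spec_solution scoville K (solution scoville K)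

-- ===== LEMMAS AND PROOFS =====

theorem mem_insLin {x y : Int} {l : List Int} : y ∈ insLin x l ↔ y = x ∨ y ∈ l := by
  induction l with
  | nil => simp [insLin]
  | cons h t ih =>
    by_cases hx : h < x <;> simp [insLin, hx, ih] <;> tauto

theorem insLin_perm (x : Int) (l : List Int) : (insLin x l).Perm (x :: l) := by
  induction l with
  | nil => simp [insLin]
  | cons h t ih =>
    by_cases hx : h < x
    · simp only [insLin, if_pos hx]
      exact (ih.cons h).trans (List.Perm.swap x h t)
    · simp [insLin, hx]

theorem insLin_pairwise {x : Int} {l : List Int}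
    (hl : l.Pairwise (fun a b => a ≤ b)) : (insLin x l).Pairwise (fun a b => a ≤ b) := by
  induction l with
  | nil => simp [insLin]
  | cons h t ih =>
    rcases List.pairwise_cons.mp hl with ⟨hht, ht⟩
    by_cases hx : h < x
    · simp only [insLin, if_pos hx]
      refine List.pairwise_cons.mpr ⟨?_, ih ht⟩
      intro y hy
      rcases mem_insLin.mp hy with rfl | hy
      · exact le_of_lt hx
      · exact hht y hy
    · simp only [insLin, if_neg hx]
      refine List.pairwise_cons.mpr ⟨?_, hl⟩
      intro y hy
      rcases List.mem_cons.mp hy with rfl | hy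
      · omega
      · exact le_trans (by omega) (hht y hy)

theorem foldl_min_self {x : Int} {t : List Int} (h : ∀ y ∈ t, x ≤ y) :
    t.foldl min x = x := by
  induction t with
  | nil => rfl
  | cons a t ih =>
    have hxa : min x a = x := min_eq_left (h a (by simp))
    simp only [List.foldl_cons, hxa]
    exact ih (fun y hy => h y (by simp [hy]))

theorem min?_sorted_head {h : Int} {t : List Int}
    (hs : (h :: t).Pairwise (fun a b => a ≤ b)) :
    PySem.List.min? (h :: t) (fun x => x) = some h := by
  rw [PySem.List.min?_id_cons]
  exact congrArg some (foldl_min_self (List.pairwise_cons.mp hs).1)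

theorem heapPop?_sorted {h : Int} {t : List Int}
    (hs : (h :: t).Pairwise (fun a b => a ≤ b)) :
    heapPop? (h :: t) = some (h, t) := by
  simp [heapPop?, min?_sorted_head hs, List.erase_cons_head]

theorem min?_id_eq_of_perm {l l' : List Int} (p : l.Perm l') :
    PySem.List.min? l (fun x => x) = PySem.List.min? l' (fun x => x) := by
  cases hm : PySem.List.min? l (fun x => x) with
  | none =>
    have hl : l = [] := (PySem.List.min?_eq_none_iff _ _).mp hm
    subst hl
    have hl' : l' = [] := p.symm.eq_nil
    subst hl'
    rfl
  | some m =>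
    cases hm' : PySem.List.min? l' (fun x => x) with
    | none =>
      have hl' : l' = [] := (PySem.List.min?_eq_none_iff _ _).mp hm'
      subst hl'
      have hl : l = [] := p.eq_nil
      subst hl
      rw [(PySem.List.min?_eq_none_iff ([] : List Int) (fun x => x)).mpr rfl] at hm
      simp at hm
    | some m' =>
      have hmem : m ∈ l := PySem.List.min?_mem hm
      have hmem' : m' ∈ l' := PySem.List.min?_mem hm'
      have h1 : m ≤ m' := PySem.List.min?_isMin hm m' (p.mem_iff.mpr hmem')
      have h2 : m' ≤ m := PySem.List.min?_isMin hm' m (p.mem_iff.mp hmem)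
      exact congrArg some (le_antisymm h1 h2)

theorem loopA_perm (K : Int) : ∀ (fuel : Nat) (l l' : List Int) (cnt : Int),
    l.Perm l' → loopA K fuel l cnt = loopA K fuel l' cnt := by
  intro fuel
  induction fuel with
  | zero => intros; rfl
  | succ fuel ih =>
    intro l l' cnt p
    simp only [loopA, heapPop?]
    rw [min?_id_eq_of_perm p]
    cases hm : PySem.List.min? l' (fun x => x) with
    | none => rfl
    | some m =>
      simp only
      by_cases hK : m ≥ K
      · simp [hK]
      · have prest : (l.erase m).Perm (l'.erase m) := p.erase m
        simp only [if_neg hK, prest.length_eq]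
        by_cases hlen : (l'.erase m).length = 0
        · simp [hlen]
        · simp only [if_neg hlen]
          rw [min?_id_eq_of_perm prest]
          cases hm2 : PySem.List.min? (l'.erase m) (fun x => x) with
          | none => rfl
          | some m2 =>
            simp only
            exact ih _ _ _ (((prest.erase m2).append (List.Perm.refl [m + m2 * 2])))

theorem loopA_eq_loopB (K : Int) : ∀ (fuel : Nat) (l : List Int) (cnt : Int),
    l.Pairwise (fun a b => a ≤ b) → loopA K fuel l cnt = loopB K fuel l cnt := by
  intro fuel
  induction fuel with
  | zero => intros; rfl
  | succ fuel ih =>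
    intro l cnt hs
    cases l with
    | nil => simp [loopA, loopB, heapPop?, PySem.List.min?]
    | cons h t =>
      simp only [loopA, loopB]
      rw [heapPop?_sorted hs]
      by_cases hK : h < K
      · have : ¬ h ≥ K := by omega
        simp only [if_neg this, if_pos hK]
        cases t with
        | nil => rfl
        | cons h2 t2 =>
          have ht : (h2 :: t2).Pairwise (fun a b => a ≤ b) := (List.pairwise_cons.mp hs).2
          have ht2 : t2.Pairwise (fun a b => a ≤ b) := (List.pairwise_cons.mp ht).2
          rw [heapPop?_sorted ht]
          show loopA K fuel (t2 ++ [h + h2 * 2]) (cnt + 1) =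
            loopB K fuel (insLin (h + 2 * h2) t2) (cnt + 1)
          have harith : h + h2 * 2 = h + 2 * h2 := by ring
          have hperm : (t2 ++ [h + 2 * h2]).Perm (insLin (h + 2 * h2) t2) :=
            List.perm_append_comm.trans (insLin_perm _ _).symm
          rw [harith, loopA_perm K fuel _ _ _ hperm]
          exact ih _ _ (insLin_pairwise ht2)
      · have : h ≥ K := by omega
        simp [this]

-- ===== VERDICT (by name: the statement is the Claim_ definition above) =====
theorem solution_spec : Claim_equal_solution := by
  intro scoville K _ _
  unfold Spec_solution solution solution_alt
  have hperm : (PySem.List.sorted scoville (fun x => x) false).Perm scoville :=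
    PySem.List.sorted_perm scoville (fun x => x) false
  have hlen : scoville.length = (PySem.List.sorted scoville (fun x => x) false).length :=
    hperm.length_eq.symm
  have hpw : (PySem.List.sorted scoville (fun x => x) false).Pairwise (fun a b => a ≤ b) :=
    PySem.List.sorted_pairwise scoville (fun x => x)
  calc loopA K scoville.length scoville 0
      = loopA K scoville.length (PySem.List.sorted scoville (fun x => x) false) 0 :=
        loopA_perm K _ _ _ _ hperm.symm
    _ = loopB K (PySem.List.sorted scoville (fun x => x) false).length
          (PySem.List.sorted scoville (fun x => x) false) 0 := by
        rw [hlen]; exact loopA_eq_loopB K _ _ _ hpw
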